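-- pv_equiv track=rewrite | github.com/tatianathevisionary/RivalSearchMCP | src/core/llms/modules/content_processor.py | _categorize_link
-- ===== SOURCE A (Python) =====
-- def _categorize_link(href: str, text: str) -> str:
--     """Categorize link based on URL and text."""
--     href_lower = href.lower()
--     text_lower = text.lower()
--
--     if any(word in href_lower for word in ["api", "docs", "reference"]):
--         return "documentation"
--     elif any(word in href_lower for word in ["guide", "tutorial", "how-to"]):
--         return "guide"
--     elif any(word in href_lower for word in ["example", "demo", "sample"]):
--         return "example"
--     elif any(word in href_lower for word in ["install", "setup", "get-started"]):
--         return "setup"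
--     elif any(word in text_lower for word in ["download", "install", "setup"]):
--         return "download"
--     else:
--         return "general"
-- ===== SOURCE B (Python) =====
-- _TABLE = [
--     (1, True,  "api",         "documentation"),
--     (1, True,  "docs",        "documentation"),
--     (1, True,  "reference",   "documentation"),
--     (2, True,  "guide",       "guide"),
--     (2, True,  "tutorial",    "guide"),
--     (2, True,  "how-to",      "guide"),
--     (3, True,  "example",     "example"),
--     (3, True,  "demo",        "example"),
--     (3, True,  "sample",      "example"),
--     (4, True,  "install",     "setup"),
--     (4, True,  "setup",       "setup"),
--     (4, True,  "get-started", "setup"),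
--     (5, False, "download",    "download"),
--     (5, False, "install",     "download"),
--     (5, False, "setup",       "download"),
-- ]
--
-- def _categorize_link(href: str, text: str) -> str:
--     """Categorize link: scan every (priority, field, keyword, category) entry
--     and keep the lowest-priority match; no early return, no per-rule groups."""
--     href_lower = href.lower()
--     text_lower = text.lower()
--     best = None
--     for prio, use_href, kw, cat in _TABLE:
--         if kw in (href_lower if use_href else text_lower):
--             if best is None or prio < best[0]:
--                 best = (prio, cat)
--     return best[1] if best is not None else "general"
-- ===== Notes on version B (the rewrite author's own statement) =====
-- stated objective: alternative
-- what changed: Replaces the ordered short-circuit if/elif chain with an exhaustive scan of a flat (priority, field, keyword, category) table that keeps the minimum-priority match in an accumulator and returns it (or 'general' if nothing matched); correct because priorities mirror the chain's precedence order.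
import Mathlib
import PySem

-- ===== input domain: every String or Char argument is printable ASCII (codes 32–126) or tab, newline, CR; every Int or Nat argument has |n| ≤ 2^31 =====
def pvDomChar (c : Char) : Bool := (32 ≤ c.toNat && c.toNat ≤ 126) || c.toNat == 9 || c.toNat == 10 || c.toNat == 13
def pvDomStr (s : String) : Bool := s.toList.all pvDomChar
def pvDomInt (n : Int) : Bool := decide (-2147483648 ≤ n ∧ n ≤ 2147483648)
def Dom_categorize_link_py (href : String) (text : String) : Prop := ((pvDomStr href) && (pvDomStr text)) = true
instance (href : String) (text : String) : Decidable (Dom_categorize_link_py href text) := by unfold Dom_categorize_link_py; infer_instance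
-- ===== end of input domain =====

-- B replaces A's ordered short-circuit if/elif chain by an exhaustive scan of a flat
-- (priority, field, keyword, category) table keeping the minimum-priority match (alternative; same cost).

-- ===== PORT A =====
def categorize_link_py (href : String) (text : String) : String :=
  let href_lower := PySem.Str.lower href
  let text_lower := PySem.Str.lower text
  if ["api", "docs", "reference"].any (fun w => PySem.Str.isIn w href_lower) then
    "documentation"
  else if ["guide", "tutorial", "how-to"].any (fun w => PySem.Str.isIn w href_lower) then
    "guide"
  else if ["example", "demo", "sample"].any (fun w => PySem.Str.isIn w href_lower) then
    "example"
  else if ["install", "setup", "get-started"].any (fun w => PySem.Str.isIn w href_lower) then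
    "setup"
  else if ["download", "install", "setup"].any (fun w => PySem.Str.isIn w text_lower) then
    "download"
  else
    "general"

-- ===== PORT B =====
-- Source B's flat keyword table: (priority, use_href, keyword, category)
def catTable : List (Nat × Bool × String × String) :=
  [ (1, true,  "api",         "documentation"),
    (1, true,  "docs",        "documentation"),
    (1, true,  "reference",   "documentation"),
    (2, true,  "guide",       "guide"),
    (2, true,  "tutorial",    "guide"),
    (2, true,  "how-to",      "guide"),
    (3, true,  "example",     "example"),
    (3, true,  "demo",        "example"),
    (3, true,  "sample",      "example"),
    (4, true,  "install",     "setup"),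
    (4, true,  "setup",       "setup"),
    (4, true,  "get-started", "setup"),
    (5, false, "download",    "download"),
    (5, false, "install",     "download"),
    (5, false, "setup",       "download") ]

-- Source B's loop: scan the whole table, keep the minimum-priority match in `best`
def bestLoop (h t : String) : List (Nat × Bool × String × String) → Option (Nat × String) → Option (Nat × String)
  | [], best => best
  | (p, useH, kw, cat) :: rest, best =>
    let field := if useH then h else t
    let best' :=
      if PySem.Str.isIn kw field then
        match best with
        | none => some (p, cat)
        | some (q, c) => if p < q then some (p, cat) else some (q, c)
      else best
    bestLoop h t rest best'

def categorize_link_py_alt (href : String) (text : String) : String :=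
  match bestLoop (PySem.Str.lower href) (PySem.Str.lower text) catTable none with
  | some (_, cat) => cat
  | none => "general"

-- ===== PRECONDITION & SPEC =====
def Spec_categorize_link_py (href : String) (text : String) (out : String) : Prop := out = categorize_link_py_alt href text
instance (href : String) (text : String) (out : String) : Decidable (Spec_categorize_link_py href text out) := by unfold Spec_categorize_link_py; infer_instance

-- ===== CLAIM (what is proved, stated in full; the proofs are below) =====
def Claim_equal_categorize_link_py : Prop := ∀ (href : String) (text : String), Dom_categorize_link_py href text → Spec_categorize_link_py href text (categorize_link_py href text)

-- ===== LEMMAS AND PROOFS =====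

-- one loop step on a non-matching entry leaves the accumulator unchanged (href field)
theorem step_false_h {h t : String} {p : Nat} {kw cat : String} {rest : List (Nat × Bool × String × String)} {best : Option (Nat × String)}
    (hkw : PySem.Str.isIn kw h = false) :
    bestLoop h t ((p, true, kw, cat) :: rest) best = bestLoop h t rest best := by
  simp only [PySem.Str.isIn_eq] at hkw
  simp [bestLoop, hkw]

-- one loop step on a non-matching entry leaves the accumulator unchanged (text field)
theorem step_false_t {h t : String} {p : Nat} {kw cat : String} {rest : List (Nat × Bool × String × String)} {best : Option (Nat × String)}
    (hkw : PySem.Str.isIn kw t = false) :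
    bestLoop h t ((p, false, kw, cat) :: rest) best = bestLoop h t rest best := by
  simp only [PySem.Str.isIn_eq] at hkw
  simp [bestLoop, hkw]

-- a matching entry with empty accumulator installs (p, cat) (href field)
theorem step_true_h {h t : String} {p : Nat} {kw cat : String} {rest : List (Nat × Bool × String × String)}
    (hkw : PySem.Str.isIn kw h = true) :
    bestLoop h t ((p, true, kw, cat) :: rest) none = bestLoop h t rest (some (p, cat)) := by
  simp only [PySem.Str.isIn_eq] at hkw
  simp [bestLoop, hkw]

-- a matching entry with empty accumulator installs (p, cat) (text field)
theorem step_true_t {h t : String} {p : Nat} {kw cat : String} {rest : List (Nat × Bool × String × String)}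
    (hkw : PySem.Str.isIn kw t = true) :
    bestLoop h t ((p, false, kw, cat) :: rest) none = bestLoop h t rest (some (p, cat)) := by
  simp only [PySem.Str.isIn_eq] at hkw
  simp [bestLoop, hkw]

-- once the accumulator holds a priority ≤ every remaining priority, the loop never changes it
theorem bestLoop_min {h t : String} {q : Nat} {c : String} {rest : List (Nat × Bool × String × String)}
    (hle : (rest.all fun e => decide (q ≤ e.1)) = true) :
    bestLoop h t rest (some (q, c)) = some (q, c) := by
  induction rest with
  | nil => rfl
  | cons e rest ih =>
    obtain ⟨p, u, kw, cat⟩ := e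
    simp only [List.all_cons, Bool.and_eq_true, decide_eq_true_eq] at hle
    have hnp : ¬ p < q := by omega
    simp only [bestLoop, hnp, if_false, ite_self]
    exact ih hle.2

-- ===== VERDICT (by name: the statement is the Claim_ definition above) =====
theorem categorize_link_py_spec : Claim_equal_categorize_link_py := by
  intro href text _
  unfold Spec_categorize_link_py categorize_link_py categorize_link_py_alt catTable
  cases hb1 : PySem.Str.isIn "api" (PySem.Str.lower href) with
  | false =>
    cases hb2 : PySem.Str.isIn "docs" (PySem.Str.lower href) with
    | false =>
      cases hb3 : PySem.Str.isIn "reference" (PySem.Str.lower href) with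
      | false =>
        cases hb4 : PySem.Str.isIn "guide" (PySem.Str.lower href) with
        | false =>
          cases hb5 : PySem.Str.isIn "tutorial" (PySem.Str.lower href) with
          | false =>
            cases hb6 : PySem.Str.isIn "how-to" (PySem.Str.lower href) with
            | false =>
              cases hb7 : PySem.Str.isIn "example" (PySem.Str.lower href) with
              | false =>
                cases hb8 : PySem.Str.isIn "demo" (PySem.Str.lower href) with
                | false =>
                  cases hb9 : PySem.Str.isIn "sample" (PySem.Str.lower href) with
                  | false =>
                    cases hb10 : PySem.Str.isIn "install" (PySem.Str.lower href) with
                    | false =>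
                      cases hb11 : PySem.Str.isIn "setup" (PySem.Str.lower href) with
                      | false =>
                        cases hb12 : PySem.Str.isIn "get-started" (PySem.Str.lower href) with
                        | false =>
                          cases hb13 : PySem.Str.isIn "download" (PySem.Str.lower text) with
                          | false =>
                            cases hb14 : PySem.Str.isIn "install" (PySem.Str.lower text) with
                            | false =>
                              cases hb15 : PySem.Str.isIn "setup" (PySem.Str.lower text) with
                              | false =>
                                rw [step_false_h hb1, step_false_h hb2, step_false_h hb3, step_false_h hb4, step_false_h hb5, step_false_h hb6, step_false_h hb7, step_false_h hb8, step_false_h hb9, step_false_h hb10, step_false_h hb11, step_false_h hb12, step_false_t hb13, step_false_t hb14, step_false_t hb15]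
                                simp only [List.any_cons, List.any_nil, Bool.or_false, hb1, hb2, hb3, hb4, hb5, hb6, hb7, hb8, hb9, hb10, hb11, hb12, hb13, hb14, hb15]
                                simp [bestLoop]
                              | true =>
                                rw [step_false_h hb1, step_false_h hb2, step_false_h hb3, step_false_h hb4, step_false_h hb5, step_false_h hb6, step_false_h hb7, step_false_h hb8, step_false_h hb9, step_false_h hb10, step_false_h hb11, step_false_h hb12, step_false_t hb13, step_false_t hb14, step_true_t hb15]
                                simp only [List.any_cons, List.any_nil, Bool.or_false, hb1, hb2, hb3, hb4, hb5, hb6, hb7, hb8, hb9, hb10, hb11, hb12, hb13, hb14, hb15]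
                                simp [bestLoop]
                            | true =>
                              rw [step_false_h hb1, step_false_h hb2, step_false_h hb3, step_false_h hb4, step_false_h hb5, step_false_h hb6, step_false_h hb7, step_false_h hb8, step_false_h hb9, step_false_h hb10, step_false_h hb11, step_false_h hb12, step_false_t hb13, step_true_t hb14, bestLoop_min]
                              · simp only [List.any_cons, List.any_nil, Bool.or_false, hb1, hb2, hb3, hb4, hb5, hb6, hb7, hb8, hb9, hb10, hb11, hb12, hb13, hb14]
                                simp
                              · decide
                          | true =>
                            rw [step_false_h hb1, step_false_h hb2, step_false_h hb3, step_false_h hb4, step_false_h hb5, step_false_h hb6, step_false_h hb7, step_false_h hb8, step_false_h hb9, step_false_h hb10, step_false_h hb11, step_false_h hb12, step_true_t hb13, bestLoop_min]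
                            · simp only [List.any_cons, List.any_nil, Bool.or_false, hb1, hb2, hb3, hb4, hb5, hb6, hb7, hb8, hb9, hb10, hb11, hb12, hb13]
                              simp
                            · decide
                        | true =>
                          rw [step_false_h hb1, step_false_h hb2, step_false_h hb3, step_false_h hb4, step_false_h hb5, step_false_h hb6, step_false_h hb7, step_false_h hb8, step_false_h hb9, step_false_h hb10, step_false_h hb11, step_true_h hb12, bestLoop_min]
                          · simp only [List.any_cons, List.any_nil, Bool.or_false, hb1, hb2, hb3, hb4, hb5, hb6, hb7, hb8, hb9, hb10, hb11, hb12]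
                            simp
                          · decide
                      | true =>
                        rw [step_false_h hb1, step_false_h hb2, step_false_h hb3, step_false_h hb4, step_false_h hb5, step_false_h hb6, step_false_h hb7, step_false_h hb8, step_false_h hb9, step_false_h hb10, step_true_h hb11, bestLoop_min]
                        · simp only [List.any_cons, List.any_nil, Bool.or_false, hb1, hb2, hb3, hb4, hb5, hb6, hb7, hb8, hb9, hb10, hb11]
                          simp
                        · decide
                    | true =>
                      rw [step_false_h hb1, step_false_h hb2, step_false_h hb3, step_false_h hb4, step_false_h hb5, step_false_h hb6, step_false_h hb7, step_false_h hb8, step_false_h hb9, step_true_h hb10, bestLoop_min]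
                      · simp only [List.any_cons, List.any_nil, Bool.or_false, hb1, hb2, hb3, hb4, hb5, hb6, hb7, hb8, hb9, hb10]
                        simp
                      · decide
                  | true =>
                    rw [step_false_h hb1, step_false_h hb2, step_false_h hb3, step_false_h hb4, step_false_h hb5, step_false_h hb6, step_false_h hb7, step_false_h hb8, step_true_h hb9, bestLoop_min]
                    · simp only [List.any_cons, List.any_nil, Bool.or_false, hb1, hb2, hb3, hb4, hb5, hb6, hb7, hb8, hb9]
                      simp
                    · decide
                | true =>
                  rw [step_false_h hb1, step_false_h hb2, step_false_h hb3, step_false_h hb4, step_false_h hb5, step_false_h hb6, step_false_h hb7, step_true_h hb8, bestLoop_min]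
                  · simp only [List.any_cons, List.any_nil, Bool.or_false, hb1, hb2, hb3, hb4, hb5, hb6, hb7, hb8]
                    simp
                  · decide
              | true =>
                rw [step_false_h hb1, step_false_h hb2, step_false_h hb3, step_false_h hb4, step_false_h hb5, step_false_h hb6, step_true_h hb7, bestLoop_min]
                · simp only [List.any_cons, List.any_nil, Bool.or_false, hb1, hb2, hb3, hb4, hb5, hb6, hb7]
                  simp
                · decide
            | true =>
              rw [step_false_h hb1, step_false_h hb2, step_false_h hb3, step_false_h hb4, step_false_h hb5, step_true_h hb6, bestLoop_min]
              · simp only [List.any_cons, List.any_nil, Bool.or_false, hb1, hb2, hb3, hb4, hb5, hb6]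
                simp
              · decide
          | true =>
            rw [step_false_h hb1, step_false_h hb2, step_false_h hb3, step_false_h hb4, step_true_h hb5, bestLoop_min]
            · simp only [List.any_cons, List.any_nil, Bool.or_false, hb1, hb2, hb3, hb4, hb5]
              simp
            · decide
        | true =>
          rw [step_false_h hb1, step_false_h hb2, step_false_h hb3, step_true_h hb4, bestLoop_min]
          · simp only [List.any_cons, List.any_nil, Bool.or_false, hb1, hb2, hb3, hb4]
            simp
          · decide
      | true =>
        rw [step_false_h hb1, step_false_h hb2, step_true_h hb3, bestLoop_min]
        · simp only [List.any_cons, List.any_nil, Bool.or_false, hb1, hb2, hb3]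
          simp
        · decide
    | true =>
      rw [step_false_h hb1, step_true_h hb2, bestLoop_min]
      · simp only [List.any_cons, List.any_nil, Bool.or_false, hb1, hb2]
        simp
      · decide
  | true =>
    rw [step_true_h hb1, bestLoop_min]
    · simp only [List.any_cons, List.any_nil, Bool.or_false, hb1]
      simp
    · decide
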